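-- pv_equiv track=rewrite | github.com/salvadorcartagena/juegoAsscii | laberinto.py | completar_paredes
-- ===== SOURCE A (Python) =====
-- def completar_paredes(cadena_laberinto, end):
--     filas = cadena_laberinto.strip().split('\n')
--     while len(filas) < end + 1:
--         filas.append("#" * (end + 1 - len(filas)))
--
--     for i in range(len(filas)):
--         while len(filas[i]) < end + 1:
--             filas[i] += '#'
--
--     laberinto_completo = '\n'.join(filas)
--     return laberinto_completo
-- ===== SOURCE B (Python) =====
-- def completar_paredes(cadena_laberinto, end):
--     width = end + 1
--     rows = cadena_laberinto.strip().split('\n')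
--     padded = [r + '#' * (width - len(r)) for r in rows]
--     padded += ['#' * width] * (max(len(rows), width) - len(rows))
--     return '\n'.join(padded)
-- ===== Notes on version B (the rewrite author's own statement) =====
-- stated objective: simpler
-- what changed: A's two mutating passes (a while loop appending progressively narrower '#' rows until the row count reaches end+1, then a per-row char-by-char while loop doing filas[i] += '#') are replaced by one comprehension that pads each existing row with a single bulk '#'*(width-len(r)) plus a single bulk extension with full '#'*width wall rows.
import Mathlib
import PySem

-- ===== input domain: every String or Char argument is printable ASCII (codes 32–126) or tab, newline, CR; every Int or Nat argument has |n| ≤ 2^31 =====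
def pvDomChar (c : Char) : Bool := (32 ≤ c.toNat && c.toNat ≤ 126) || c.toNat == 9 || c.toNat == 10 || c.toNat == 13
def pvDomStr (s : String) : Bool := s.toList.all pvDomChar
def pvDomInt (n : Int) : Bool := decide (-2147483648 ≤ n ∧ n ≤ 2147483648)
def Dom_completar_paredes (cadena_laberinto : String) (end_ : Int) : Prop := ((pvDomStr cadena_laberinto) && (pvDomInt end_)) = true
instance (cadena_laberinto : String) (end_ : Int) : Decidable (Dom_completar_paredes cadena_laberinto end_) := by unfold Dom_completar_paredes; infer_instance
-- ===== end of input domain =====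

-- B replaces A's two mutating while-loop passes by one padding comprehension plus a bulk wall extension (objective: simpler).

-- ===== PORT A =====
-- inner 'while len(filas[i]) < end+1: filas[i] += "#"' (one '#' per iteration)
def pvPadRowA (w : Int) (row : List Char) : List Char :=
  if (row.length : Int) < w then pvPadRowA w (row ++ ['#']) else row
termination_by (w - row.length).toNat
decreasing_by simp at *; omega

-- outer 'while len(filas) < end+1: filas.append("#" * (end+1-len(filas)))'
def pvExtendA (w : Int) (filas : List (List Char)) : List (List Char) :=
  if (filas.length : Int) < w then
    pvExtendA w (filas ++ [List.replicate (w - filas.length).toNat '#'])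
  else filas
termination_by (w - filas.length).toNat
decreasing_by simp at *; omega

def completar_paredes (cadena_laberinto : String) (end_ : Int) : String :=
  let filas := PySem.Chars.splitOn (PySem.Chars.strip cadena_laberinto.toList) ['\n']
  let filas := pvExtendA (end_ + 1) filas
  let filas := filas.map (pvPadRowA (end_ + 1))
  String.ofList (PySem.Chars.join ['\n'] filas)

-- ===== PORT B =====
def completar_paredes_alt (cadena_laberinto : String) (end_ : Int) : String :=
  let width := end_ + 1
  let rows := PySem.Chars.splitOn (PySem.Chars.strip cadena_laberinto.toList) ['\n']
  let padded := rows.map (fun r => r ++ List.replicate (width - r.length).toNat '#')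
  let padded := padded ++ List.replicate (max rows.length width.toNat - rows.length)
                  (List.replicate width.toNat '#')
  String.ofList (PySem.Chars.join ['\n'] padded)

-- ===== PRECONDITION & SPEC =====
def Spec_completar_paredes (cadena_laberinto : String) (end_ : Int) (out : String) : Prop := out = completar_paredes_alt cadena_laberinto end_
instance (cadena_laberinto : String) (end_ : Int) (out : String) : Decidable (Spec_completar_paredes cadena_laberinto end_ out) := by unfold Spec_completar_paredes; infer_instance

-- ===== CLAIM (what is proved, stated in full; the proofs are below) =====
def Claim_equal_completar_paredes : Prop := ∀ (cadena_laberinto : String) (end_ : Int), Dom_completar_paredes cadena_laberinto end_ → Spec_completar_paredes cadena_laberinto end_ (completar_paredes cadena_laberinto end_)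

-- ===== LEMMAS AND PROOFS =====

-- the inner while loop is a single pad-to-width
theorem pvPadRowA_eq (w : Int) (row : List Char) :
    pvPadRowA w row = row ++ List.replicate (w - row.length).toNat '#' := by
  fun_induction pvPadRowA w row with
  | case1 row h ih =>
    rw [ih]
    simp only [List.append_assoc, List.singleton_append]
    congr 1
    have : (w - (row.length : Int)).toNat = ((w - ((row ++ ['#']).length : Int)).toNat) + 1 := by
      simp; omega
    rw [this, List.replicate_succ]
  | case2 row h =>
    have : (w - (row.length : Int)).toNat = 0 := by omega
    simp [this]

-- the outer while loop, after padding, appends full walls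
theorem pvExtendA_map_pad (w : Int) (filas : List (List Char)) :
    (pvExtendA w filas).map (pvPadRowA w)
      = filas.map (pvPadRowA w)
        ++ List.replicate (w - filas.length).toNat (List.replicate w.toNat '#') := by
  fun_induction pvExtendA w filas with
  | case1 filas h ih =>
    rw [ih]
    simp only [List.map_append, List.map_cons, List.map_nil, List.append_assoc]
    congr 1
    have hwall : pvPadRowA w (List.replicate (w - (filas.length : Int)).toNat '#')
        = List.replicate w.toNat '#' := by
      rw [pvPadRowA_eq, ← List.replicate_add]
      simp only [List.length_replicate]
      congr 1
      omega
    rw [hwall]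
    simp only [List.length_append, List.length_cons, List.length_nil, Nat.cast_add, Nat.cast_one, zero_add]
    rw [show (w - (filas.length : Int)).toNat = (w - ((filas.length : Int) + 1)).toNat + 1 from by omega,
        List.replicate_succ, List.singleton_append]
  | case2 filas h =>
    have : (w - (filas.length : Int)).toNat = 0 := by omega
    simp [this]

-- ===== VERDICT (by name: the statement is the Claim_ definition above) =====
theorem completar_paredes_spec : Claim_equal_completar_paredes := by
  intro s end_ _
  unfold Spec_completar_paredes completar_paredes completar_paredes_alt
  simp only
  rw [pvExtendA_map_pad]
  have hmap : List.map (pvPadRowA (end_ + 1)) (PySem.Chars.splitOn (PySem.Chars.strip s.toList) ['\n'])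
      = List.map (fun r => r ++ List.replicate ((end_ + 1) - (r.length : Int)).toNat '#')
          (PySem.Chars.splitOn (PySem.Chars.strip s.toList) ['\n']) :=
    List.map_congr_left (fun r _ => pvPadRowA_eq _ r)
  rw [hmap,
    show ((end_ + 1) - ((PySem.Chars.splitOn (PySem.Chars.strip s.toList) ['\n']).length : Int)).toNat
        = max (PySem.Chars.splitOn (PySem.Chars.strip s.toList) ['\n']).length (end_ + 1).toNat
          - (PySem.Chars.splitOn (PySem.Chars.strip s.toList) ['\n']).length from by omega]
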